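-- pv_equiv track=rewrite | github.com/jamolanguekd/hangman | engine.py | char_generator
-- ===== SOURCE A (Python) =====
-- def char_generator(list_words):
--     word_list = [n for n in list_words]
--     char_seq = []
--     for word in word_list:
--         for letter in word:
--                 if word.count(letter) > char_seq.count(letter):
--                     char_seq.append(letter)
--     char_seq = ''.join(sorted(char_seq))
--     return char_seq
-- ===== SOURCE B (Python) =====
-- def char_generator(list_words):
--     letters = sorted({c for word in list_words for c in word})
--     return ''.join(c * max(word.count(c) for word in list_words) for c in letters)
-- ===== Notes on version B (the rewrite author's own statement) =====
-- stated objective: simpler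
-- what changed: A grows an accumulator letter by letter, rescanning it with .count at every position and sorting at the end; B directly builds the sorted result: it collects the distinct letters once, sorts them, and emits each letter replicated to its maximum per-word count.
import Mathlib
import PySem

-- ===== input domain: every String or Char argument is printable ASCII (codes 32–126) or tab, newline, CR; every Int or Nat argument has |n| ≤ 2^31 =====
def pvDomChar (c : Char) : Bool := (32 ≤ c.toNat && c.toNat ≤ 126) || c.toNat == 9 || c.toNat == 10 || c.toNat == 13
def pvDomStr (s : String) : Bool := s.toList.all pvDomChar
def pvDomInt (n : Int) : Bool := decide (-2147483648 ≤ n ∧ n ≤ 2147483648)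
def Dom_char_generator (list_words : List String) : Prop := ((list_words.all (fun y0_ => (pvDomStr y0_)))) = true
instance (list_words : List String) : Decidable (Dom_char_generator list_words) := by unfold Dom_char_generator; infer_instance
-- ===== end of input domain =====

-- B replaces A's rescanning accumulator loop by a direct sorted-distinct-letters expansion (simpler); return values proved equal on all inputs.

-- ===== PORT A =====
def char_generator (list_words : List String) : String :=
  let word_list := list_words
  let char_seq : List Char :=
    word_list.foldl (fun acc word =>
      word.toList.foldl (fun acc2 letter =>
        if acc2.count letter < word.toList.count letter then acc2 ++ [letter] else acc2) acc) []
  String.mk (PySem.List.sorted char_seq (fun x => x) false)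

-- ===== PORT B =====
-- word.count(c) for a single character c is exactly the character count (List.count).
-- Python's max(...) is over a nonempty generator whenever c ∈ letters; .getD 0 is never reached.
def char_generator_alt (list_words : List String) : String :=
  let letters := PySem.List.sorted
      (PySem.Set.ofList (list_words.flatMap (fun word => word.toList))) (fun x => x) false
  String.mk (letters.flatMap (fun c =>
    List.replicate
      ((PySem.List.max? (list_words.map (fun word => word.toList.count c)) (fun x => x)).getD 0) c))

-- ===== PRECONDITION & SPEC =====
def Spec_char_generator (list_words : List String) (out : String) : Prop := out = char_generator_alt list_words
instance (list_words : List String) (out : String) : Decidable (Spec_char_generator list_words out) := by unfold Spec_char_generator; infer_instance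

-- ===== CLAIM (what is proved, stated in full; the proofs are below) =====
def Claim_equal_char_generator : Prop := ∀ (list_words : List String), Dom_char_generator list_words → Spec_char_generator list_words (char_generator list_words)

-- ===== LEMMAS AND PROOFS =====

-- the running maximum of the per-word counts of c
def pvMaxCount (ws : List String) (c : Char) : Nat :=
  ws.foldl (fun m w => max m (w.toList.count c)) 0

-- inner loop of A: count of c after processing letters l of word with count function f
theorem pv_inner_count (f : Char → Nat) (c : Char) :
    ∀ (l : List Char) (acc : List Char),
      ((l.foldl (fun a x => if a.count x < f x then a ++ [x] else a) acc).count c)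
        = max (acc.count c) (min (f c) (acc.count c + l.count c)) := by
  intro l
  induction l with
  | nil => intro acc; simp
  | cons h t ih =>
    intro acc
    by_cases hc : h = c
    · subst hc
      simp only [List.foldl_cons]
      by_cases hlt : acc.count h < f h
      · rw [if_pos hlt, ih]
        simp [List.count_append]
        omega
      · rw [if_neg hlt, ih]
        simp only [List.count_cons]
        omega
    · simp only [List.foldl_cons]
      have hcnt : ∀ b : List Char, (if b.count h < f h then b ++ [h] else b).count c = b.count c := by
        intro b
        split
        · simp [List.count_append, hc]
        · rfl
      rw [ih, hcnt]
      simp [hc]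

-- outer loop of A: count of c in char_seq
theorem pv_outer_count (c : Char) :
    ∀ (ws : List String) (acc : List Char),
      ((ws.foldl (fun a w =>
          w.toList.foldl (fun a2 x => if a2.count x < w.toList.count x then a2 ++ [x] else a2) a) acc).count c)
        = ws.foldl (fun m w => max m (w.toList.count c)) (acc.count c) := by
  intro ws
  induction ws with
  | nil => intro acc; simp
  | cons w t ih =>
    intro acc
    simp only [List.foldl_cons]
    rw [ih, pv_inner_count]
    have : max (acc.count c) (min (w.toList.count c) (acc.count c + w.toList.count c))
        = max (acc.count c) (w.toList.count c) := by omega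
    rw [this]

theorem pv_foldl_max_init (f : String → Nat) :
    ∀ (ws : List String) (m : Nat),
      ws.foldl (fun a w => max a (f w)) m = max m (ws.foldl (fun a w => max a (f w)) 0) := by
  intro ws
  induction ws with
  | nil => intro m; simp
  | cons w t ih =>
    intro m
    simp only [List.foldl_cons]
    rw [ih (max m (f w)), ih (max 0 (f w))]
    omega

theorem pv_maxCount_pos (ws : List String) (c : Char) :
    0 < pvMaxCount ws c ↔ ∃ w ∈ ws, c ∈ w.toList := by
  induction ws with
  | nil => simp [pvMaxCount]
  | cons w t ih =>
    unfold pvMaxCount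
    simp only [List.foldl_cons]
    rw [pv_foldl_max_init (fun w => w.toList.count c)]
    unfold pvMaxCount at ih
    constructor
    · intro h
      rcases lt_max_iff.mp h with h1 | h2
      · exact ⟨w, by simp, List.count_pos_iff.mp (by omega)⟩
      · rcases ih.mp h2 with ⟨u, hu, hcu⟩
        exact ⟨u, by simp [hu], hcu⟩
    · rintro ⟨u, hu, hcu⟩
      rcases List.mem_cons.mp hu with rfl | hu'
      · have := List.count_pos_iff.mpr hcu
        omega
      · have := ih.mpr ⟨u, hu', hcu⟩
        omega

theorem pv_maxCount_eq_max? (ws : List String) (c : Char) :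
    ((PySem.List.max? (ws.map (fun w => w.toList.count c)) (fun x => x)).getD 0) = pvMaxCount ws c := by
  cases ws with
  | nil => simp [PySem.List.max?, pvMaxCount]
  | cons w t =>
    simp only [List.map_cons, PySem.List.max?_id_cons, Option.getD_some]
    unfold pvMaxCount
    simp only [List.foldl_cons, List.foldl_map]
    rw [pv_foldl_max_init (fun w => w.toList.count c) t (max 0 _)]
    rw [pv_foldl_max_init (fun w => w.toList.count c) t (w.toList.count c)]
    rfl

-- count of c in B's expansion
theorem pv_flat_count (g : Char → Nat) (c : Char) :
    ∀ (letters : List Char), letters.Nodup →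
      ((letters.flatMap (fun d => List.replicate (g d) d)).count c)
        = if c ∈ letters then g c else 0 := by
  intro letters
  induction letters with
  | nil => intro _; simp
  | cons d t ih =>
    intro hnd
    rcases List.nodup_cons.mp hnd with ⟨hd, ht⟩
    simp only [List.flatMap_cons, List.count_append, ih ht, List.count_replicate]
    by_cases hcd : c = d
    · subst hcd
      simp [hd]
    · simp [hcd, Ne.symm hcd]

-- B's expansion list is sorted (≤)
theorem pv_flat_pairwise (g : Char → Nat) :
    ∀ (letters : List Char), letters.Pairwise (· < ·) →
      (letters.flatMap (fun d => List.replicate (g d) d)).Pairwise (· ≤ ·) := by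
  intro letters
  induction letters with
  | nil => intro _; simp
  | cons d t ih =>
    intro hp
    rcases List.pairwise_cons.mp hp with ⟨hd, ht⟩
    simp only [List.flatMap_cons]
    rw [List.pairwise_append]
    refine ⟨List.pairwise_replicate.mpr (by simp), ih ht, ?_⟩
    intro a ha b hb
    have ha' : a = d := (List.eq_of_mem_replicate ha)
    rcases List.mem_flatMap.mp hb with ⟨e, he, hbe⟩
    have hb' : b = e := List.eq_of_mem_replicate hbe
    subst ha'; subst hb'
    exact le_of_lt (hd _ he)

-- ===== VERDICT (by name: the statement is the Claim_ definition above) =====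
theorem char_generator_spec : Claim_equal_char_generator := by
  intro ws _
  unfold Spec_char_generator char_generator char_generator_alt
  simp only []
  congr 1
  set letters := PySem.List.sorted
      (PySem.Set.ofList (ws.flatMap (fun word => word.toList))) (fun x => x) false with hlet
  set flat := letters.flatMap (fun c =>
    List.replicate
      ((PySem.List.max? (ws.map (fun word => word.toList.count c)) (fun x => x)).getD 0) c) with hflat
  have hnodup : letters.Nodup := by
    have := PySem.List.sorted_perm
      (PySem.Set.ofList (ws.flatMap (fun word => word.toList))) (fun x : Char => x) false
    exact this.nodup_iff.mpr (PySem.Set.nodup_ofList _)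
  have hmemlet : ∀ c : Char, c ∈ letters ↔ ∃ w ∈ ws, c ∈ w.toList := by
    intro c
    rw [hlet, PySem.List.mem_sorted, PySem.Set.mem_ofList, List.mem_flatMap]
  have hcount : ∀ c : Char, flat.count c = pvMaxCount ws c := by
    intro c
    rw [hflat]
    have := pv_flat_count
      (fun c => ((PySem.List.max? (ws.map (fun w => w.toList.count c)) (fun x => x)).getD 0)) c letters hnodup
    rw [this]
    by_cases hc : c ∈ letters
    · rw [if_pos hc]; exact pv_maxCount_eq_max? ws c
    · rw [if_neg hc]
      by_contra hne
      have hpos : 0 < pvMaxCount ws c := Nat.pos_of_ne_zero (fun h => hne h.symm)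
      exact hc ((hmemlet c).mpr ((pv_maxCount_pos ws c).mp hpos))
  have hperm : flat.Perm (ws.foldl (fun acc w =>
      w.toList.foldl (fun a2 x => if a2.count x < w.toList.count x then a2 ++ [x] else a2) acc) []) := by
    rw [List.perm_iff_count]
    intro c
    rw [hcount c, pv_outer_count c ws []]
    simp [pvMaxCount]
  have hpw : flat.Pairwise (· ≤ ·) := by
    apply pv_flat_pairwise
    exact PySem.List.sorted_ofList_pairwise_lt _
  exact PySem.List.sorted_id_eq_of_perm_of_pairwise _ _ hperm hpw
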